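-- pv_equiv track=rewrite | github.com/TuringEnterprises/SWE-Bench-plus-plus | swebench/harness/run_evaluation.py | replace_git_apply_block
-- ===== SOURCE A (Python) =====
-- def replace_git_apply_block(script_content: str, new_content: str) -> str:
--     """
--     Replaces the content inside 'git apply' heredoc blocks in a bash script.
--
--     Args:
--         script_content (str): The original bash script as a string.
--         new_content (str): The new content to place inside the heredoc blocks.
--
--     Returns:
--         str: The modified bash script with replaced heredoc content.
--     """
--     lines = script_content.splitlines(keepends=True)
--     result = []
--     in_heredoc = False
--     heredoc_end = None
--
--     for line in lines:
--         if not in_heredoc: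
--             if line.startswith("git apply") and "<<" in line:
--                 # Extract heredoc delimiter, e.g., <<'EOF_abc123'
--                 start = line.find("<<'") + 3
--                 end = line.find("'", start)
--                 heredoc_end = line[start:end]
--                 in_heredoc = True
--
--                 # Keep the git apply line
--                 result.append(line)
--
--                 # Insert the new content immediately after
--                 result.append(new_content if new_content.endswith('\n') else new_content + '\n')
--             else:
--                 result.append(line)
--         else:
--             # Skip original heredoc content until we find the ending marker
--             if line.strip() == heredoc_end:
--                 # Found the heredoc end marker; append it and exit heredoc
--                 result.append(line)
--                 in_heredoc = False
--                 heredoc_end = None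
--             # Else skip the line (we've already replaced content)
--
--     return ''.join(result)
-- ===== SOURCE B (Python) =====
-- def replace_git_apply_block(script_content: str, new_content: str) -> str:
--     """Two-pass rewrite: first collect heredoc block spans, then rebuild the script."""
--     lines = script_content.splitlines(keepends=True)
--     n = len(lines)
--     nc = new_content if new_content.endswith('\n') else new_content + '\n'
--
--     # Pass 1: spans (i, j): i = git-apply line index, j = terminator index (or n if none).
--     spans = []
--     i = 0
--     while i < n:
--         line = lines[i]
--         if line.startswith("git apply") and "<<" in line:
--             start = line.find("<<'") + 3
--             end = line.find("'", start)
--             delim = line[start:end]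
--             j = i + 1
--             while j < n and lines[j].strip() != delim:
--                 j += 1
--             spans.append((i, j))
--             i = j + 1
--         else:
--             i += 1
--
--     # Pass 2: rebuild.
--     out = []
--     pos = 0
--     for (i, j) in spans:
--         out.extend(lines[pos:i])
--         out.append(lines[i])
--         out.append(nc)
--         if j < n:
--             out.append(lines[j])
--         pos = j + 1
--     out.extend(lines[pos:])
--     return ''.join(out)
-- ===== Notes on version B (the rewrite author's own statement) =====
-- stated objective: alternative
-- what changed: A's single-pass state machine (in_heredoc flag threaded through one loop) is replaced by a two-pass rewrite: pass 1 collects heredoc block spans (git-apply line index, terminator index) and pass 2 rebuilds the script from the line list and the spans.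
import Mathlib
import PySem

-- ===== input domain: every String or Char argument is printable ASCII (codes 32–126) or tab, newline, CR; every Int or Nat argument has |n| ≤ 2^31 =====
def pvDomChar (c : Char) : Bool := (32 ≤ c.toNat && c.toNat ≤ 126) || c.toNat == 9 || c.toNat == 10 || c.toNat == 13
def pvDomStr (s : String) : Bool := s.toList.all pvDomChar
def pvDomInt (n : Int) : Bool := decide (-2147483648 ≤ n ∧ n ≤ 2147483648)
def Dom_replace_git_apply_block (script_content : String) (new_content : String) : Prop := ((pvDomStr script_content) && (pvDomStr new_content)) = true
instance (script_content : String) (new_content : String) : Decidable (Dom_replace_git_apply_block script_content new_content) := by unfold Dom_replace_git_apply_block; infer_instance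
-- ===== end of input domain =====

-- B is a two-pass rewrite (collect heredoc spans, then rebuild) equal in return value to A's
-- one-pass state machine; objective: alternative decomposition, same asymptotic cost.

-- ===== SHARED HELPERS (both Pythons contain these identical sub-computations) =====

-- str.splitlines(keepends=True), ported by hand: exact on the task domain, where the only
-- line-break characters are '\n', '\r' and the pair "\r\n" (Python's extra break characters
-- \v, \f, \x1c-\x1e, \x85, … are outside Dom).
def pvSplitKeepGo : List Char → List Char → List (List Char)
  | cur, [] => if cur = [] then [] else [cur.reverse]
  | cur, '\r' :: '\n' :: rest => (cur.reverse ++ ['\r', '\n']) :: pvSplitKeepGo [] rest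
  | cur, '\r' :: rest => (cur.reverse ++ ['\r']) :: pvSplitKeepGo [] rest
  | cur, '\n' :: rest => (cur.reverse ++ ['\n']) :: pvSplitKeepGo [] rest
  | cur, c :: rest => pvSplitKeepGo (c :: cur) rest

def pvSplitKeep (cs : List Char) : List (List Char) := pvSplitKeepGo [] cs

-- the delimiter extraction both Pythons perform on a git-apply line:
-- start = line.find("<<'") + 3; end = line.find("'", start); line[start:end]
def pvDelim (line : List Char) : List Char :=
  let start := PySem.Chars.find line "<<'".toList + 3
  let stop := PySem.Chars.findFrom line ['\''] start none
  PySem.List.slice line (some start) (some stop)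

-- the guard both Pythons test: line.startswith("git apply") and "<<" in line
def pvIsGitApply (line : List Char) : Bool :=
  PySem.Chars.startswith line "git apply".toList && PySem.Chars.isIn "<<".toList line

-- ===== PORT A =====
-- A's single loop over the lines, state = (in_heredoc, heredoc_end); the loop body appends to
-- `result`, rendered as the emitted output of a structural recursion.
def pvGoA (nc : List Char) : List (List Char) → Option (List Char) → List (List Char)
  | [], _ => []
  | l :: ls, none =>
    if pvIsGitApply l then
      l :: (if PySem.Chars.endswith nc ['\n'] then nc else nc ++ ['\n'])
        :: pvGoA nc ls (some (pvDelim l))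
    else
      l :: pvGoA nc ls none
  | l :: ls, some d =>
    if PySem.Chars.strip l == d then l :: pvGoA nc ls none
    else pvGoA nc ls (some d)

def replace_git_apply_block (script_content : String) (new_content : String) : String :=
  String.ofList (PySem.Chars.join []
    (pvGoA new_content.toList (pvSplitKeep script_content.toList) none))

-- ===== PORT B =====
-- B's index-based while loops, written with an exact fuel (lines.length - start index) so the
-- recursion is structural; the fuel only makes the same computation total, it never changes it.

-- inner while loop: first j ≥ start with lines[j].strip() == d, or lines.length if none
def pvFindTermGo (lines : List (List Char)) (d : List Char) : Nat → Nat → Nat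
  | 0, j => j
  | fuel + 1, j =>
    if h : j < lines.length then
      if PySem.Chars.strip lines[j] == d then j else pvFindTermGo lines d fuel (j + 1)
    else j

def pvFindTerm (lines : List (List Char)) (d : List Char) (j : Nat) : Nat :=
  pvFindTermGo lines d (lines.length - j) j

-- pass 1: spans (i, j) — i the git-apply line, j the terminator line (lines.length if none)
def pvSpansGo (lines : List (List Char)) : Nat → Nat → List (Nat × Nat)
  | 0, _ => []
  | fuel + 1, i =>
    if h : i < lines.length then
      if pvIsGitApply lines[i] then
        let j := pvFindTerm lines (pvDelim lines[i]) (i + 1)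
        (i, j) :: pvSpansGo lines fuel (j + 1)
      else pvSpansGo lines fuel (i + 1)
    else []

def pvSpans (lines : List (List Char)) (i : Nat) : List (Nat × Nat) :=
  pvSpansGo lines (lines.length - i) i

-- pass 2: rebuild.  lines[pos:i] with 0 ≤ pos, i is exactly (lines.drop pos).take (i - pos)
-- (Python clamps out-of-range nonnegative slice bounds exactly as drop/take do);
-- lines[i] is in range whenever pvSpans produced the span, so the `.getD []` default is inert.
def pvBuild (lines : List (List Char)) (nc : List Char) : List (Nat × Nat) → Nat → List (List Char)
  | [], pos => lines.drop pos
  | (i, j) :: rest, pos =>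
    (lines.drop pos).take (i - pos)
      ++ lines[i]?.getD [] :: nc
      :: ((if j < lines.length then [lines[j]?.getD []] else []) ++ pvBuild lines nc rest (j + 1))

def replace_git_apply_block_alt (script_content : String) (new_content : String) : String :=
  let lines := pvSplitKeep script_content.toList
  let nc := new_content.toList
  let ncl := if PySem.Chars.endswith nc ['\n'] then nc else nc ++ ['\n']
  String.ofList (PySem.Chars.join [] (pvBuild lines ncl (pvSpans lines 0) 0))

-- ===== PRECONDITION & SPEC =====
def Spec_replace_git_apply_block (script_content : String) (new_content : String) (out : String) : Prop := out = replace_git_apply_block_alt script_content new_content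
instance (script_content : String) (new_content : String) (out : String) : Decidable (Spec_replace_git_apply_block script_content new_content out) := by unfold Spec_replace_git_apply_block; infer_instance

-- ===== CLAIM (what is proved, stated in full; the proofs are below) =====
def Claim_equal_replace_git_apply_block : Prop := ∀ (script_content : String) (new_content : String), Dom_replace_git_apply_block script_content new_content → Spec_replace_git_apply_block script_content new_content (replace_git_apply_block script_content new_content)

-- ===== LEMMAS AND PROOFS =====

theorem le_pvFindTermGo (lines : List (List Char)) (d : List Char) :
    ∀ fuel j, j ≤ pvFindTermGo lines d fuel j := by
  intro fuel
  induction fuel with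
  | zero => intro j; exact le_refl j
  | succ fuel ih =>
    intro j
    simp only [pvFindTermGo]
    split
    · split
      · exact le_refl j
      · exact Nat.le_trans (Nat.le_succ j) (ih (j + 1))
    · exact le_refl j

theorem le_pvFindTerm (lines : List (List Char)) (d : List Char) (j : Nat) :
    j ≤ pvFindTerm lines d j :=
  le_pvFindTermGo lines d (lines.length - j) j

-- the while-loop unfolding of pvFindTerm (the fuel is exact, so one step peels one index)
theorem pvFindTerm_eq (lines : List (List Char)) (d : List Char) (j : Nat) :
    pvFindTerm lines d j =
      if h : j < lines.length then
        (if PySem.Chars.strip lines[j] == d then j else pvFindTerm lines d (j + 1))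
      else j := by
  unfold pvFindTerm
  by_cases h : j < lines.length
  · have hf : lines.length - j = (lines.length - (j + 1)) + 1 := by omega
    rw [hf]
    simp only [pvFindTermGo, h, dif_pos]
  · have hf : lines.length - j = 0 := by omega
    rw [hf]
    simp only [pvFindTermGo, h, dif_neg]
    simp [h]

-- fuel irrelevance for the outer loop: any sufficient fuel computes the same spans
theorem pvSpansGo_fuel (lines : List (List Char)) :
    ∀ f1 f2 i, lines.length - i ≤ f1 → lines.length - i ≤ f2 →
      pvSpansGo lines f1 i = pvSpansGo lines f2 i := by
  intro f1
  induction f1 with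
  | zero =>
    intro f2 i h1 h2
    have h : ¬ i < lines.length := by omega
    cases f2 with
    | zero => rfl
    | succ f2 => simp [pvSpansGo, h]
  | succ f1 ih =>
    intro f2 i h1 h2
    by_cases h : i < lines.length
    · cases f2 with
      | zero => omega
      | succ f2 =>
        simp only [pvSpansGo, h, dif_pos]
        by_cases hg : pvIsGitApply lines[i]
        · have hj := le_pvFindTerm lines (pvDelim lines[i]) (i + 1)
          simp only [hg, if_pos]
          rw [ih f2 (pvFindTerm lines (pvDelim lines[i]) (i + 1) + 1) (by omega) (by omega)]
        · simp only [hg, Bool.false_eq_true, if_false]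
          exact ih f2 (i + 1) (by omega) (by omega)
    · cases f2 with
      | zero => simp [pvSpansGo, h]
      | succ f2 => simp [pvSpansGo, h]

-- the while-loop unfolding of pvSpans
theorem pvSpans_eq (lines : List (List Char)) (i : Nat) :
    pvSpans lines i =
      if h : i < lines.length then
        (if pvIsGitApply lines[i] then
          (i, pvFindTerm lines (pvDelim lines[i]) (i + 1)) ::
            pvSpans lines (pvFindTerm lines (pvDelim lines[i]) (i + 1) + 1)
        else pvSpans lines (i + 1))
      else [] := by
  unfold pvSpans
  by_cases h : i < lines.length
  · have hf : lines.length - i = (lines.length - (i + 1)) + 1 := by omega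
    rw [hf]
    simp only [pvSpansGo, h, dif_pos]
    by_cases hg : pvIsGitApply lines[i]
    · have hj := le_pvFindTerm lines (pvDelim lines[i]) (i + 1)
      simp only [hg, if_pos]
      rw [pvSpansGo_fuel lines (lines.length - (i + 1))
        (lines.length - (pvFindTerm lines (pvDelim lines[i]) (i + 1) + 1))
        (pvFindTerm lines (pvDelim lines[i]) (i + 1) + 1) (by omega) (by omega)]
    · simp [hg]
  · have hf : lines.length - i = 0 := by omega
    rw [hf]
    simp only [pvSpansGo]
    simp [h]

-- A's in-heredoc phase skips to the first terminator found by pvFindTerm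
theorem pvGoA_heredoc (lines : List (List Char)) (nc d : List Char) :
    ∀ m k, lines.length - k ≤ m →
      pvGoA nc (lines.drop k) (some d) =
        (if h : pvFindTerm lines d k < lines.length then
          lines[pvFindTerm lines d k] :: pvGoA nc (lines.drop (pvFindTerm lines d k + 1)) none
        else []) := by
  intro m
  induction m with
  | zero =>
    intro k hk
    have h : ¬ k < lines.length := by omega
    rw [List.drop_eq_nil_of_le (by omega), pvFindTerm_eq]
    simp only [h, dite_false]
    simp [pvGoA]
  | succ m ih =>
    intro k hk
    rw [pvFindTerm_eq]
    by_cases h : k < lines.length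
    · rw [List.drop_eq_getElem_cons h]
      by_cases hs : PySem.Chars.strip lines[k] == d
      · simp only [pvGoA, hs, if_pos, h, dif_pos]
      · simp only [pvGoA, hs, Bool.false_eq_true, if_false]
        rw [ih (k + 1) (by omega)]
        simp only [h, dif_pos]
    · rw [List.drop_eq_nil_of_le (by omega)]
      simp only [h, dite_false]
      simp [pvGoA]
  
-- every span start produced from index i is ≥ i
theorem pvSpans_fst_ge (lines : List (List Char)) :
    ∀ m i, lines.length - i ≤ m → ∀ p ∈ pvSpans lines i, i ≤ p.1 := by
  intro m
  induction m with
  | zero =>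
    intro i hi
    rw [pvSpans_eq]
    have h : ¬ i < lines.length := by omega
    simp [h]
  | succ m ih =>
    intro i hi
    rw [pvSpans_eq]
    by_cases h : i < lines.length
    · simp only [h, dif_pos]
      by_cases hg : pvIsGitApply lines[i]
      · simp only [hg, if_pos]
        intro p hp
        rcases List.mem_cons.mp hp with hp | hp
        · subst hp; exact le_refl i
        · have hj := le_pvFindTerm lines (pvDelim lines[i]) (i + 1)
          have := ih (pvFindTerm lines (pvDelim lines[i]) (i + 1) + 1) (by omega) p hp
          omega
      · simp only [hg, Bool.false_eq_true, if_false]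
        intro p hp
        have := ih (i + 1) (by omega) p hp
        omega
    · simp [h]

-- rebuilding from pos copies line pos verbatim when every span starts later
theorem pvBuild_shift (lines : List (List Char)) (nc : List Char) (spans : List (Nat × Nat))
    (pos : Nat) (hpos : pos < lines.length) (hs : ∀ p ∈ spans, pos + 1 ≤ p.1) :
    pvBuild lines nc spans pos = lines[pos] :: pvBuild lines nc spans (pos + 1) := by
  cases spans with
  | nil =>
    show lines.drop pos = lines[pos] :: lines.drop (pos + 1)
    exact List.drop_eq_getElem_cons hpos
  | cons p rest =>
    obtain ⟨i, j⟩ := p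
    have hi : pos + 1 ≤ i := hs (i, j) (List.mem_cons_self)
    simp only [pvBuild]
    rw [List.drop_eq_getElem_cons hpos]
    have h1 : i - pos = (i - (pos + 1)) + 1 := by omega
    rw [h1, List.take_succ_cons]
    simp

-- main invariant: A's machine on the suffix from i equals B's rebuild of the spans from i
theorem pvGoA_eq_pvBuild (lines : List (List Char)) (nc ncl : List Char)
    (hn : ncl = (if PySem.Chars.endswith nc ['\n'] then nc else nc ++ ['\n'])) :
    ∀ m i, lines.length - i ≤ m →
      pvGoA nc (lines.drop i) none = pvBuild lines ncl (pvSpans lines i) i := by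
  intro m
  induction m with
  | zero =>
    intro i hi
    have h : ¬ i < lines.length := by omega
    rw [pvSpans_eq, List.drop_eq_nil_of_le (by omega)]
    simp only [h, dite_false]
    show pvGoA nc [] none = lines.drop i
    rw [List.drop_eq_nil_of_le (by omega)]
    rfl
  | succ m ih =>
    intro i hi
    rw [pvSpans_eq]
    by_cases h : i < lines.length
    · by_cases hg : pvIsGitApply lines[i]
      · simp only [h, dif_pos, hg, if_pos]
        rw [List.drop_eq_getElem_cons h]
        simp only [pvGoA, hg, if_pos]
        rw [pvGoA_heredoc lines nc (pvDelim lines[i]) (lines.length) (i + 1) (by omega)]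
        set j := pvFindTerm lines (pvDelim lines[i]) (i + 1) with hjdef
        have hj : i + 1 ≤ j := le_pvFindTerm lines (pvDelim lines[i]) (i + 1)
        simp only [pvBuild, Nat.sub_self, List.take_zero, List.nil_append]
        rw [List.getElem?_eq_getElem h]
        by_cases hjn : j < lines.length
        · rw [dif_pos hjn, ih (j + 1) (by omega), List.getElem?_eq_getElem hjn]
          simp [hn, hjn]
        · rw [dif_neg hjn, pvSpans_eq]
          have h2 : ¬ j + 1 < lines.length := by omega
          simp only [h2, dite_false]
          simp only [pvBuild]
          rw [List.drop_eq_nil_of_le (show lines.length ≤ j + 1 by omega)]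
          simp [hjn, hn]
      · simp only [h, dif_pos, hg, Bool.false_eq_true, if_false]
        rw [List.drop_eq_getElem_cons h]
        simp only [pvGoA, hg, Bool.false_eq_true, if_false]
        rw [ih (i + 1) (by omega)]
        rw [pvBuild_shift lines ncl _ i h
          (pvSpans_fst_ge lines lines.length (i + 1) (by omega))]
    · have h2 : ¬ i < lines.length := h
      rw [List.drop_eq_nil_of_le (by omega)]
      simp only [h2, dite_false]
      show pvGoA nc [] none = lines.drop i
      rw [List.drop_eq_nil_of_le (by omega)]
      rfl

-- ===== VERDICT (by name: the statement is the Claim_ definition above) =====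
theorem replace_git_apply_block_spec : Claim_equal_replace_git_apply_block := by
  intro s nc _
  unfold Spec_replace_git_apply_block replace_git_apply_block replace_git_apply_block_alt
  have h := pvGoA_eq_pvBuild (pvSplitKeep s.toList) nc.toList _ rfl
    (pvSplitKeep s.toList).length 0 (by omega)
  simp only [List.drop_zero] at h
  rw [h]
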